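-- pv_equiv track=rewrite | github.com/hkit99394/GridTown-Optimizer | python/cp_sat_solver.py | compute_gate_downstream_cells
-- ===== SOURCE A (Python) =====
-- def compute_reachable_road_ids_without_gate(road_neighbor_ids, road_eligible_ids, eligible_row0_ids, blocked_gate_id):
--     start_ids = [cell_id for cell_id in eligible_row0_ids if cell_id != blocked_gate_id]
--     visited = set(start_ids)
--     queue = list(start_ids)
--     index = 0
--     while index < len(queue):
--         cell_id = queue[index]
--         index += 1
--         for neighbor_id in road_neighbor_ids.get(cell_id, []):
--             if neighbor_id == blocked_gate_id or neighbor_id not in road_eligible_ids or neighbor_id in visited: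
--                 continue
--             visited.add(neighbor_id)
--             queue.append(neighbor_id)
--     return visited
--
-- def compute_gate_downstream_cells(road_neighbor_ids, road_eligible_ids, eligible_row0_ids):
--     road_eligible_ids = set(road_eligible_ids)
--     gate_downstream_cells = {}
--     for gate_id in road_eligible_ids:
--         reachable_without_gate = compute_reachable_road_ids_without_gate(
--             road_neighbor_ids, road_eligible_ids, eligible_row0_ids, gate_id
--         )
--         downstream = road_eligible_ids - reachable_without_gate - {gate_id}
--         if downstream:
--             gate_downstream_cells[gate_id] = downstream
--     return gate_downstream_cells
-- ===== SOURCE B (Python) =====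
-- def compute_gate_downstream_cells(road_neighbor_ids, road_eligible_ids, eligible_row0_ids):
--     eligible = set(road_eligible_ids)
--     result = {}
--     for gate in eligible:
--         # reachable-without-gate by frontier saturation (round-based fixed point,
--         # no queue): each round adds every eligible non-gate neighbor of the
--         # current reached set; at most len(eligible) productive rounds exist.
--         reach = {c for c in eligible_row0_ids if c != gate}
--         for _ in range(len(eligible) + 1):
--             frontier = {y for x in reach for y in road_neighbor_ids.get(x, [])
--                         if y != gate and y in eligible and y not in reach}
--             if not frontier:
--                 break
--             reach |= frontier
--         downstream = {c for c in eligible if c not in reach and c != gate}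
--         if downstream:
--             result[gate] = downstream
--     return result
-- ===== Notes on version B (the rewrite author's own statement) =====
-- stated objective: alternative
-- what changed: Replaces A's per-gate worklist BFS (explicit queue with a moving index) by a per-gate round-based frontier-saturation fixed point: each round collects all eligible non-gate neighbors of the whole reached set at once and unions them in, stopping when a round adds nothing.
import Mathlib
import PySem

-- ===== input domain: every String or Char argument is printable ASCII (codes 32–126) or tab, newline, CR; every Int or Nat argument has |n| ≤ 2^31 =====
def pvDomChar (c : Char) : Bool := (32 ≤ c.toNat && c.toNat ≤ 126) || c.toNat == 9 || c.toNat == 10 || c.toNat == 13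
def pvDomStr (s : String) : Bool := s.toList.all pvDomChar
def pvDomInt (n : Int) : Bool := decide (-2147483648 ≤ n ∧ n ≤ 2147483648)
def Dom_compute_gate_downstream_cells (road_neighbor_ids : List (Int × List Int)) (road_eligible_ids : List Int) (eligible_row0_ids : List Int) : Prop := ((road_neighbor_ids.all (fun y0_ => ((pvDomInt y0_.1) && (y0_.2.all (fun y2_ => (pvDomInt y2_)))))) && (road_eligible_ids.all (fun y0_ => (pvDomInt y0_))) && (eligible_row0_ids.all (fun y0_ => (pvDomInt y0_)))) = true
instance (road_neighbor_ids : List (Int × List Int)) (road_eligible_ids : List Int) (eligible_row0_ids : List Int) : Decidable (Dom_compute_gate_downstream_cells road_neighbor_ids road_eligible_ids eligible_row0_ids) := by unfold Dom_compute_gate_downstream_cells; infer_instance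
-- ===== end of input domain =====

-- B replaces A's per-gate worklist BFS (queue + moving index) by a per-gate round-based
-- frontier-saturation fixed point (objective: alternative; same exact results).

-- ===== PORT A =====
-- road_neighbor_ids.get(cell_id, [])
def pvNbrs (road_neighbor_ids : List (Int × List Int)) (c : Int) : List Int :=
  PySem.Dict.getD ⟨road_neighbor_ids⟩ c []

-- one neighbour of the popped cell: skip if blocked / not eligible / already visited,
-- else add to visited and append to the queue
def pvStepA (elig : PySem.Set Int) (g : Int) (s : PySem.Set Int × List Int) (y : Int) :
    PySem.Set Int × List Int :=
  if y = g ∨ PySem.Set.contains elig y = false ∨ PySem.Set.contains s.1 y = true then s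
  else (PySem.Set.add s.1 y, s.2 ++ [y])

-- the `while index < len(queue)` loop of compute_reachable_road_ids_without_gate:
-- state = (visited, queue[index:]); fuel bounds the number of iterations (the final
-- queue length), which is at most |start list| + |eligible set|
def pvBfsA (road_neighbor_ids : List (Int × List Int)) (elig : PySem.Set Int) (g : Int) :
    Nat → PySem.Set Int → List Int → PySem.Set Int
  | 0, v, _ => v
  | _ + 1, v, [] => v
  | f + 1, v, c :: rest =>
    let st := (pvNbrs road_neighbor_ids c).foldl (pvStepA elig g) (v, rest)
    pvBfsA road_neighbor_ids elig g f st.1 st.2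

def compute_gate_downstream_cells (road_neighbor_ids : List (Int × List Int)) (road_eligible_ids : List Int) (eligible_row0_ids : List Int) : List (Int × List Int) :=
  let elig : PySem.Set Int := PySem.Set.ofList road_eligible_ids
  (List.foldl (fun (acc : PySem.Dict Int (List Int)) gate =>
      let starts := eligible_row0_ids.filter (fun c => c != gate)
      let reach := pvBfsA road_neighbor_ids elig gate
        (eligible_row0_ids.length + road_eligible_ids.length + 1) (PySem.Set.ofList starts) starts
      let downstream := PySem.Set.diff (PySem.Set.diff elig reach) (PySem.Set.ofList [gate])
      if downstream = [] then acc else acc.insert gate downstream)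
    (PySem.Dict.mk []) elig).items

-- ===== PORT B =====
-- {y for x in reach for y in road_neighbor_ids.get(x, []) if y != gate and y in eligible and y not in reach}
def pvFrontier (road_neighbor_ids : List (Int × List Int)) (elig : PySem.Set Int) (g : Int)
    (r : PySem.Set Int) : PySem.Set Int :=
  PySem.Set.ofList (r.flatMap (fun x =>
    (pvNbrs road_neighbor_ids x).filter
      (fun y => y != g && PySem.Set.contains elig y && !PySem.Set.contains r y)))

-- the bounded saturation loop: `for _ in range(len(eligible) + 1): … if not frontier: break`
def pvSatB (road_neighbor_ids : List (Int × List Int)) (elig : PySem.Set Int) (g : Int) :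
    Nat → PySem.Set Int → PySem.Set Int
  | 0, r => r
  | f + 1, r =>
    let fr := pvFrontier road_neighbor_ids elig g r
    if fr = [] then r else pvSatB road_neighbor_ids elig g f (PySem.Set.union r fr)

def compute_gate_downstream_cells_alt (road_neighbor_ids : List (Int × List Int)) (road_eligible_ids : List Int) (eligible_row0_ids : List Int) : List (Int × List Int) :=
  let elig : PySem.Set Int := PySem.Set.ofList road_eligible_ids
  (List.foldl (fun (acc : PySem.Dict Int (List Int)) gate =>
      let reach := pvSatB road_neighbor_ids elig gate (elig.length + 1)
        (PySem.Set.ofList (eligible_row0_ids.filter (fun c => c != gate)))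
      let downstream :=
        PySem.Set.ofList (elig.filter (fun c => !PySem.Set.contains reach c && c != gate))
      if downstream = [] then acc else acc.insert gate downstream)
    (PySem.Dict.mk []) elig).items

-- ===== PRECONDITION & SPEC =====
def Spec_compute_gate_downstream_cells (road_neighbor_ids : List (Int × List Int)) (road_eligible_ids : List Int) (eligible_row0_ids : List Int) (out : List (Int × List Int)) : Prop := out = compute_gate_downstream_cells_alt road_neighbor_ids road_eligible_ids eligible_row0_ids
instance (road_neighbor_ids : List (Int × List Int)) (road_eligible_ids : List Int) (eligible_row0_ids : List Int) (out : List (Int × List Int)) : Decidable (Spec_compute_gate_downstream_cells road_neighbor_ids road_eligible_ids eligible_row0_ids out) := by unfold Spec_compute_gate_downstream_cells; infer_instance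

-- ===== CLAIM (what is proved, stated in full; the proofs are below) =====
def Claim_equal_compute_gate_downstream_cells : Prop := ∀ (road_neighbor_ids : List (Int × List Int)) (road_eligible_ids : List Int) (eligible_row0_ids : List Int), Dom_compute_gate_downstream_cells road_neighbor_ids road_eligible_ids eligible_row0_ids → Spec_compute_gate_downstream_cells road_neighbor_ids road_eligible_ids eligible_row0_ids (compute_gate_downstream_cells road_neighbor_ids road_eligible_ids eligible_row0_ids)

-- ===== LEMMAS AND PROOFS =====

-- cells reachable from `starts` along eligible non-gate neighbours
inductive pvReach (rni : List (Int × List Int)) (elig : PySem.Set Int) (g : Int)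
    (starts : List Int) : Int → Prop
  | start (x : Int) : x ∈ starts → pvReach rni elig g starts x
  | step (x y : Int) : pvReach rni elig g starts x → y ∈ pvNbrs rni x → y ≠ g → y ∈ elig →
      pvReach rni elig g starts y

-- number of eligible cells not yet reached (the termination measure of both loops)
def pvM (elig r : PySem.Set Int) : Nat :=
  (List.filter (fun c => !PySem.Set.contains r c) elig).length

lemma pv_mem_frontier (rni : List (Int × List Int)) (elig : PySem.Set Int) (g : Int)
    (r : PySem.Set Int) (y : Int) :
    y ∈ pvFrontier rni elig g r ↔
      ∃ x ∈ r, y ∈ pvNbrs rni x ∧ y ≠ g ∧ y ∈ elig ∧ y ∉ r := by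
  unfold pvFrontier
  simp [PySem.Set.mem_ofList, List.mem_flatMap, List.mem_filter, PySem.Set.contains,
    bne_iff_ne]
  tauto

lemma pvM_strict (elig r r' : PySem.Set Int) (y : Int) (hsub : ∀ x ∈ r, x ∈ r')
    (hy : y ∈ elig) (hyr : y ∉ r) (hyr' : y ∈ r') : pvM elig r' < pvM elig r := by
  unfold pvM
  have hcongr : List.filter (fun c => !PySem.Set.contains r' c) elig =
      List.filter (fun c => !PySem.Set.contains r' c && !PySem.Set.contains r c) elig := by
    apply List.filter_congr
    intro c _
    cases h1 : PySem.Set.contains r' c <;> cases h2 : PySem.Set.contains r c <;>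
      simp_all [PySem.Set.contains]
  rw [hcongr, ← List.filter_filter]
  apply List.length_filter_lt_length_iff_exists.mpr
  refine ⟨y, List.mem_filter.mpr ⟨hy, ?_⟩, ?_⟩
  · simp [PySem.Set.contains, hyr]
  · simp [PySem.Set.contains, hyr']

lemma pvSat_mono (rni : List (Int × List Int)) (elig : PySem.Set Int) (g : Int)
    (f : Nat) (r : PySem.Set Int) (x : Int) (hx : x ∈ r) : x ∈ pvSatB rni elig g f r := by
  induction f generalizing r hx with
  | zero => exact hx
  | succ f ih =>
    simp only [pvSatB]
    split
    · exact hx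
    · exact ih _ ((PySem.Set.mem_union _ _ _).mpr (Or.inl hx))

lemma pvSat_sound (rni : List (Int × List Int)) (elig : PySem.Set Int) (g : Int)
    (starts : List Int) (f : Nat) (r : PySem.Set Int)
    (hr : ∀ x ∈ r, pvReach rni elig g starts x) :
    ∀ x ∈ pvSatB rni elig g f r, pvReach rni elig g starts x := by
  induction f generalizing r hr with
  | zero => exact hr
  | succ f ih =>
    simp only [pvSatB]
    split
    · exact hr
    · apply ih
      intro x hx
      rcases (PySem.Set.mem_union _ _ _).mp hx with h | h
      · exact hr x h
      · obtain ⟨x', hx'r, hnb, hg, he, _⟩ := (pv_mem_frontier rni elig g r x).mp h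
        exact pvReach.step x' x (hr x' hx'r) hnb hg he

lemma pvSat_closed (rni : List (Int × List Int)) (elig : PySem.Set Int) (g : Int)
    (f : Nat) (r : PySem.Set Int) (hf : pvM elig r < f) :
    ∀ x ∈ pvSatB rni elig g f r, ∀ y, y ∈ pvNbrs rni x → y ≠ g → y ∈ elig →
      y ∈ pvSatB rni elig g f r := by
  induction f generalizing r with
  | zero => omega
  | succ f ih =>
    by_cases h : pvFrontier rni elig g r = []
    · simp only [pvSatB, h, if_pos]
      intro x hx y hnb hg he
      by_cases hyr : y ∈ r
      · exact hyr
      · exfalso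
        have : y ∈ pvFrontier rni elig g r :=
          (pv_mem_frontier rni elig g r y).mpr ⟨x, hx, hnb, hg, he, hyr⟩
        rw [h] at this
        exact absurd this (List.not_mem_nil)
    · obtain ⟨y₀, hy₀⟩ := List.exists_mem_of_ne_nil _ h
      obtain ⟨_, _, _, _, hy₀e, hy₀r⟩ := (pv_mem_frontier rni elig g r y₀).mp hy₀
      have hm : pvM elig (PySem.Set.union r (pvFrontier rni elig g r)) < pvM elig r :=
        pvM_strict elig r _ y₀ (fun x hx => (PySem.Set.mem_union _ _ _).mpr (Or.inl hx))
          hy₀e hy₀r ((PySem.Set.mem_union _ _ _).mpr (Or.inr hy₀))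
      simp only [pvSatB, h, if_false]
      exact ih _ (by omega)

lemma pvSat_complete (rni : List (Int × List Int)) (elig : PySem.Set Int) (g : Int)
    (starts : List Int) (f : Nat) (r : PySem.Set Int) (hf : pvM elig r < f)
    (hs : ∀ s ∈ starts, s ∈ r) :
    ∀ x, pvReach rni elig g starts x → x ∈ pvSatB rni elig g f r := by
  intro x hx
  induction hx with
  | start x h => exact pvSat_mono rni elig g f r x (hs x h)
  | step x y _ hnb hg he ih => exact pvSat_closed rni elig g f r hf x ih y hnb hg he

lemma pvStepA_eq_pos (elig : PySem.Set Int) (g : Int) (s : PySem.Set Int × List Int) (y : Int)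
    (hc : y = g ∨ PySem.Set.contains elig y = false ∨ PySem.Set.contains s.1 y = true) :
    pvStepA elig g s y = s := by
  unfold pvStepA; exact if_pos hc

lemma pvStepA_eq_neg (elig : PySem.Set Int) (g : Int) (s : PySem.Set Int × List Int) (y : Int)
    (hc : ¬(y = g ∨ PySem.Set.contains elig y = false ∨ PySem.Set.contains s.1 y = true)) :
    pvStepA elig g s y = (PySem.Set.add s.1 y, s.2 ++ [y]) := by
  unfold pvStepA; exact if_neg hc

lemma pvFoldA_mono1 (elig : PySem.Set Int) (g : Int) (l : List Int)
    (s : PySem.Set Int × List Int) (x : Int) (hx : x ∈ s.1) :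
    x ∈ (l.foldl (pvStepA elig g) s).1 := by
  induction l generalizing s hx with
  | nil => exact hx
  | cons y t ih =>
    simp only [List.foldl_cons]
    apply ih
    by_cases hc : y = g ∨ PySem.Set.contains elig y = false ∨ PySem.Set.contains s.1 y = true
    · rw [pvStepA_eq_pos elig g s y hc]; exact hx
    · rw [pvStepA_eq_neg elig g s y hc]
      exact (PySem.Set.mem_add s.1 y x).mpr (Or.inl hx)

lemma pvFoldA_mono2 (elig : PySem.Set Int) (g : Int) (l : List Int)
    (s : PySem.Set Int × List Int) (x : Int) (hx : x ∈ s.2) :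
    x ∈ (l.foldl (pvStepA elig g) s).2 := by
  induction l generalizing s hx with
  | nil => exact hx
  | cons y t ih =>
    simp only [List.foldl_cons]
    apply ih
    by_cases hc : y = g ∨ PySem.Set.contains elig y = false ∨ PySem.Set.contains s.1 y = true
    · rw [pvStepA_eq_pos elig g s y hc]; exact hx
    · rw [pvStepA_eq_neg elig g s y hc]
      exact List.mem_append.mpr (Or.inl hx)

lemma pvFoldA_sub (elig : PySem.Set Int) (g : Int) (l : List Int)
    (s : PySem.Set Int × List Int) (x : Int) (hx : x ∈ (l.foldl (pvStepA elig g) s).1) :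
    x ∈ s.1 ∨ x ∈ (l.foldl (pvStepA elig g) s).2 := by
  induction l generalizing s with
  | nil => exact Or.inl hx
  | cons y t ih =>
    simp only [List.foldl_cons] at hx ⊢
    by_cases hc : y = g ∨ PySem.Set.contains elig y = false ∨ PySem.Set.contains s.1 y = true
    · rw [pvStepA_eq_pos elig g s y hc] at hx ⊢
      exact ih s hx
    · rw [pvStepA_eq_neg elig g s y hc] at hx ⊢
      rcases ih _ hx with h1 | h2
      · rcases (PySem.Set.mem_add s.1 y x).mp h1 with h | rfl
        · exact Or.inl h
        · exact Or.inr (pvFoldA_mono2 elig g t _ x (List.mem_append.mpr (Or.inr (by simp))))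
      · exact Or.inr h2

lemma pvFoldA_expands (elig : PySem.Set Int) (g : Int) (l : List Int)
    (s : PySem.Set Int × List Int) (y : Int) (hy : y ∈ l) (hg : y ≠ g) (he : y ∈ elig) :
    y ∈ (l.foldl (pvStepA elig g) s).1 := by
  induction l generalizing s with
  | nil => cases hy
  | cons y₀ t ih =>
    simp only [List.foldl_cons]
    rcases List.mem_cons.mp hy with rfl | hyt
    · apply pvFoldA_mono1
      by_cases hc : y = g ∨ PySem.Set.contains elig y = false ∨ PySem.Set.contains s.1 y = true
      · rw [pvStepA_eq_pos elig g s y hc]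
        rcases hc with h | h | h
        · exact absurd h hg
        · exfalso
          simp [PySem.Set.contains] at h
          exact h he
        · simpa [PySem.Set.contains] using h
      · rw [pvStepA_eq_neg elig g s y hc]
        exact (PySem.Set.mem_add s.1 y y).mpr (Or.inr rfl)
    · exact ih _ hyt

lemma pvFoldA_measure (elig : PySem.Set Int) (g : Int) (l : List Int)
    (s : PySem.Set Int × List Int) :
    (l.foldl (pvStepA elig g) s).2.length + pvM elig (l.foldl (pvStepA elig g) s).1 ≤
      s.2.length + pvM elig s.1 := by
  induction l generalizing s with
  | nil => exact le_refl _
  | cons y t ih =>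
    simp only [List.foldl_cons]
    refine le_trans (ih (pvStepA elig g s y)) ?_
    by_cases hc : y = g ∨ PySem.Set.contains elig y = false ∨ PySem.Set.contains s.1 y = true
    · rw [pvStepA_eq_pos elig g s y hc]
    · rw [pvStepA_eq_neg elig g s y hc]
      have hye : y ∈ elig := by
        have : ¬ PySem.Set.contains elig y = false := fun h => hc (Or.inr (Or.inl h))
        simpa [PySem.Set.contains, Bool.not_eq_false] using this
      have hyv : y ∉ s.1 := by
        have : ¬ PySem.Set.contains s.1 y = true := fun h => hc (Or.inr (Or.inr h))
        simpa [PySem.Set.contains] using this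
      have hlt : pvM elig (PySem.Set.add s.1 y) < pvM elig s.1 :=
        pvM_strict elig s.1 _ y (fun x hx => (PySem.Set.mem_add s.1 y x).mpr (Or.inl hx))
          hye hyv ((PySem.Set.mem_add s.1 y y).mpr (Or.inr rfl))
      simp only [List.length_append, List.length_cons, List.length_nil]
      omega

lemma pvBfs_mono (rni : List (Int × List Int)) (elig : PySem.Set Int) (g : Int)
    (f : Nat) (v : PySem.Set Int) (p : List Int) (x : Int) (hx : x ∈ v) :
    x ∈ pvBfsA rni elig g f v p := by
  induction f generalizing v p hx with
  | zero => exact hx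
  | succ f ih =>
    cases p with
    | nil => exact hx
    | cons c rest =>
      simp only [pvBfsA]
      exact ih _ _ (pvFoldA_mono1 elig g _ (v, rest) x hx)

lemma pvFoldA_sound (rni : List (Int × List Int)) (elig : PySem.Set Int) (g : Int)
    (starts : List Int) (l : List Int) (s : PySem.Set Int × List Int)
    (hl : ∀ y ∈ l, y ≠ g → y ∈ elig → pvReach rni elig g starts y)
    (hv : ∀ x ∈ s.1, pvReach rni elig g starts x)
    (hq : ∀ x ∈ s.2, pvReach rni elig g starts x) :
    (∀ x ∈ (l.foldl (pvStepA elig g) s).1, pvReach rni elig g starts x) ∧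
      (∀ x ∈ (l.foldl (pvStepA elig g) s).2, pvReach rni elig g starts x) := by
  induction l generalizing s hv hq with
  | nil => exact ⟨hv, hq⟩
  | cons y t ih =>
    simp only [List.foldl_cons]
    by_cases hc : y = g ∨ PySem.Set.contains elig y = false ∨ PySem.Set.contains s.1 y = true
    · rw [pvStepA_eq_pos elig g s y hc]
      exact ih s (fun z hz => hl z (List.mem_cons.mpr (Or.inr hz))) hv hq
    · rw [pvStepA_eq_neg elig g s y hc]
      have hg : y ≠ g := fun h => hc (Or.inl h)
      have hye : y ∈ elig := by
        have : ¬ PySem.Set.contains elig y = false := fun h => hc (Or.inr (Or.inl h))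
        simpa [PySem.Set.contains, Bool.not_eq_false] using this
      have hR : pvReach rni elig g starts y := hl y (List.mem_cons.mpr (Or.inl rfl)) hg hye
      refine ih _ (fun z hz => hl z (List.mem_cons.mpr (Or.inr hz))) ?_ ?_
      · intro x hx
        rcases (PySem.Set.mem_add s.1 y x).mp hx with h | rfl
        · exact hv x h
        · exact hR
      · intro x hx
        rcases List.mem_append.mp hx with h | h
        · exact hq x h
        · simp at h; exact h ▸ hR

lemma pvBfs_sound (rni : List (Int × List Int)) (elig : PySem.Set Int) (g : Int)
    (starts : List Int) (f : Nat) (v : PySem.Set Int) (p : List Int)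
    (hv : ∀ x ∈ v, pvReach rni elig g starts x) (hp : ∀ x ∈ p, pvReach rni elig g starts x) :
    ∀ x ∈ pvBfsA rni elig g f v p, pvReach rni elig g starts x := by
  induction f generalizing v p hv hp with
  | zero => exact hv
  | succ f ih =>
    cases p with
    | nil => exact hv
    | cons c rest =>
      simp only [pvBfsA]
      have hRc : pvReach rni elig g starts c := hp c (List.mem_cons.mpr (Or.inl rfl))
      have hfold := pvFoldA_sound rni elig g starts (pvNbrs rni c) (v, rest)
        (fun y hy hg he => pvReach.step c y hRc hy hg he) hv
        (fun x hx => hp x (List.mem_cons.mpr (Or.inr hx)))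
      exact ih _ _ hfold.1 hfold.2

lemma pvBfs_closed (rni : List (Int × List Int)) (elig : PySem.Set Int) (g : Int)
    (f : Nat) (v : PySem.Set Int) (p : List Int) (hf : p.length + pvM elig v < f)
    (hP : ∀ x ∈ v, x ∉ p → ∀ y, y ∈ pvNbrs rni x → y ≠ g → y ∈ elig → y ∈ v) :
    ∀ x ∈ pvBfsA rni elig g f v p, ∀ y, y ∈ pvNbrs rni x → y ≠ g → y ∈ elig →
      y ∈ pvBfsA rni elig g f v p := by
  induction f generalizing v p with
  | zero => omega
  | succ f ih =>
    cases p with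
    | nil =>
      intro x hx y h1 h2 h3
      exact hP x hx (List.not_mem_nil) y h1 h2 h3
    | cons c rest =>
      simp only [pvBfsA]
      apply ih
      · have hme := pvFoldA_measure elig g (pvNbrs rni c) (v, rest)
        dsimp only at hme
        simp only [List.length_cons] at hf
        omega
      · intro x hxst hxnp y h1 h2 h3
        rcases pvFoldA_sub elig g _ (v, rest) x hxst with hxv | hx2
        · by_cases hxp : x ∈ c :: rest
          · rcases List.mem_cons.mp hxp with rfl | hxrest
            · exact pvFoldA_expands elig g (pvNbrs rni x) (v, rest) y h1 h2 h3
            · exact absurd (pvFoldA_mono2 elig g _ (v, rest) x hxrest) hxnp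
          · exact pvFoldA_mono1 elig g _ (v, rest) y (hP x hxv hxp y h1 h2 h3)
        · exact absurd hx2 hxnp

lemma pvBfs_complete (rni : List (Int × List Int)) (elig : PySem.Set Int) (g : Int)
    (starts : List Int) (f : Nat) (hf : starts.length + pvM elig (PySem.Set.ofList starts) < f) :
    ∀ x, pvReach rni elig g starts x →
      x ∈ pvBfsA rni elig g f (PySem.Set.ofList starts) starts := by
  have hcl := pvBfs_closed rni elig g f (PySem.Set.ofList starts) starts hf
    (fun x hx hnx => absurd ((PySem.Set.mem_ofList starts x).mp hx) hnx)
  intro x hx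
  induction hx with
  | start x h =>
    exact pvBfs_mono rni elig g f _ starts x ((PySem.Set.mem_ofList starts x).mpr h)
  | step x y _ h1 h2 h3 ih => exact hcl x ih y h1 h2 h3

-- the two reachable sets agree on membership
lemma pv_reach_iff (rni : List (Int × List Int)) (re row0 : List Int) (g : Int) (x : Int) :
    x ∈ pvBfsA rni (PySem.Set.ofList re) g (row0.length + re.length + 1)
        (PySem.Set.ofList (row0.filter (fun c => c != g))) (row0.filter (fun c => c != g)) ↔
      x ∈ pvSatB rni (PySem.Set.ofList re) g ((PySem.Set.ofList re : PySem.Set Int).length + 1)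
        (PySem.Set.ofList (row0.filter (fun c => c != g))) := by
  constructor
  · intro h
    apply pvSat_complete rni (PySem.Set.ofList re) g (row0.filter (fun c => c != g))
    · exact Nat.lt_succ_of_le (List.length_filter_le _ _)
    · exact fun s hs => (PySem.Set.mem_ofList _ s).mpr hs
    · exact pvBfs_sound rni _ g _ _ _ _
        (fun z hz => pvReach.start z ((PySem.Set.mem_ofList _ z).mp hz))
        (fun z hz => pvReach.start z hz) x h
  · intro h
    apply pvBfs_complete rni (PySem.Set.ofList re) g (row0.filter (fun c => c != g))
    · have h1 : (row0.filter (fun c => c != g)).length ≤ row0.length :=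
        List.length_filter_le _ _
      have h2 : pvM (PySem.Set.ofList re) (PySem.Set.ofList (row0.filter (fun c => c != g))) ≤
          (PySem.Set.ofList re : PySem.Set Int).length := List.length_filter_le _ _
      have h3 : (PySem.Set.ofList re : PySem.Set Int).length ≤ re.length :=
        PySem.Set.length_ofList_le re
      omega
    · exact pvSat_sound rni _ g _ _ _
        (fun z hz => pvReach.start z ((PySem.Set.mem_ofList _ z).mp hz)) x h

lemma pv_downstream_eq (rni : List (Int × List Int)) (re row0 : List Int) (g : Int) :
    PySem.Set.diff (PySem.Set.diff (PySem.Set.ofList re)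
        (pvBfsA rni (PySem.Set.ofList re) g (row0.length + re.length + 1)
          (PySem.Set.ofList (row0.filter (fun c => c != g))) (row0.filter (fun c => c != g))))
        (PySem.Set.ofList [g]) =
      PySem.Set.ofList ((PySem.Set.ofList re : PySem.Set Int).filter
        (fun c => !PySem.Set.contains (pvSatB rni (PySem.Set.ofList re) g
            ((PySem.Set.ofList re : PySem.Set Int).length + 1)
            (PySem.Set.ofList (row0.filter (fun c => c != g)))) c && c != g)) := by
  rw [PySem.Set.ofList_eq_self_of_nodup _ ((PySem.Set.nodup_ofList re).filter _)]
  simp only [PySem.Set.diff]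
  rw [List.filter_filter]
  apply List.filter_congr
  intro c _
  have hAB := pv_reach_iff rni re row0 g c
  have hco : PySem.Set.contains (pvBfsA rni (PySem.Set.ofList re) g
        (row0.length + re.length + 1) (PySem.Set.ofList (row0.filter (fun c => c != g)))
        (row0.filter (fun c => c != g))) c =
      PySem.Set.contains (pvSatB rni (PySem.Set.ofList re) g
        ((PySem.Set.ofList re : PySem.Set Int).length + 1)
        (PySem.Set.ofList (row0.filter (fun c => c != g)))) c := by
    rw [Bool.eq_iff_iff]
    simp only [PySem.Set.contains, List.contains_iff_mem]
    exact hAB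
  rw [hco]
  have hg1 : (PySem.Set.ofList [g] : PySem.Set Int) = [g] :=
    PySem.Set.ofList_eq_self_of_nodup _ (List.nodup_singleton g)
  rw [hg1]
  simp only [Bool.and_comm]
  by_cases h : c = g <;> simp [h]

lemma pv_ports_eq (road_neighbor_ids : List (Int × List Int)) (road_eligible_ids : List Int)
    (eligible_row0_ids : List Int) :
    compute_gate_downstream_cells road_neighbor_ids road_eligible_ids eligible_row0_ids =
      compute_gate_downstream_cells_alt road_neighbor_ids road_eligible_ids eligible_row0_ids := by
  unfold compute_gate_downstream_cells compute_gate_downstream_cells_alt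
  dsimp only
  refine congrArg PySem.Dict.items ?_
  refine congrArg
    (fun f => List.foldl f (PySem.Dict.mk [])
      (PySem.Set.ofList road_eligible_ids : PySem.Set Int)) ?_
  funext acc gate
  rw [pv_downstream_eq road_neighbor_ids road_eligible_ids eligible_row0_ids gate]

-- ===== VERDICT (by name: the statement is the Claim_ definition above) =====
theorem compute_gate_downstream_cells_spec : Claim_equal_compute_gate_downstream_cells := by
  intro rni re row0 _hDom
  exact pv_ports_eq rni re row0
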